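-- pv_equiv track=rewrite | github.com/Prkr88/SearchEngine_GoldenCCB | Model/Parser.py | make_upper_case
-- ===== SOURCE A (Python) =====
-- def make_upper_case(term):
--     i = 0
--     word = term
--     for ch in word:
--         if 96 < ord(ch) < 123:
--             word = word[:i] + chr(ord(ch) - 32) + word[i + 1:]
--         i += 1
--     return word
-- ===== SOURCE B (Python) =====
-- _TABLE = str.maketrans('abcdefghijklmnopqrstuvwxyz', 'ABCDEFGHIJKLMNOPQRSTUVWXYZ')
--
-- def make_upper_case(term):
--     return term.translate(_TABLE)
-- ===== Notes on version B (the rewrite author's own statement) =====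
-- stated objective: idiomatic
-- what changed: Replaced A's index-tracking loop that rebuilds the string by slicing at each lowercase position with a single translate() pass through a precomputed 26-letter translation table.
import Mathlib
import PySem

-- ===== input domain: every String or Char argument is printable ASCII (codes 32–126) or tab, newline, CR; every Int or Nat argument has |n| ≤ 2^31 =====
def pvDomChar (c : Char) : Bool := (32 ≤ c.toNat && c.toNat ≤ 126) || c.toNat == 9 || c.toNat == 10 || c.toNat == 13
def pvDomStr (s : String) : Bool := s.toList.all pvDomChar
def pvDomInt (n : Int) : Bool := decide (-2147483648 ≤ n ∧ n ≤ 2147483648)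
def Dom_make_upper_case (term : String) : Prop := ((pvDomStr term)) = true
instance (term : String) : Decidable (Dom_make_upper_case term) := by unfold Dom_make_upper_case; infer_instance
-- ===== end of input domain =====

-- B replaces A's index-tracking loop that rebuilds the string by slicing at each lowercase
-- position with a single table-driven translate pass over the string (idiomatic).

-- ===== PORT A =====
-- A: i = 0; word = term; for ch in word: if 96 < ord(ch) < 123: word = word[:i] + chr(ord(ch)-32) + word[i+1:]; i += 1
def make_upper_case (term : String) : String :=
  let res := term.toList.foldl
    (fun (st : Int × List Char) ch =>
      let i := st.1
      let word := st.2
      if 96 < ch.toNat ∧ ch.toNat < 123 then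
        (i + 1, PySem.List.slice word none (some i) ++ [Char.ofNat (ch.toNat - 32)]
                  ++ PySem.List.slice word (some (i + 1)) none)
      else (i + 1, word))
    ((0 : Int), term.toList)
  String.mk res.2

-- ===== PORT B =====
-- the maketrans table: {ord(lower): ord(upper)} for the 26 ASCII lowercase letters
def pvUpperTable : List (Nat × Nat) :=
  ("abcdefghijklmnopqrstuvwxyz".toList.zip "ABCDEFGHIJKLMNOPQRSTUVWXYZ".toList).map
    (fun p => (p.1.toNat, p.2.toNat))

-- term.translate(table): each char is looked up by code point, replaced on a hit
def make_upper_case_alt (term : String) : String :=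
  String.mk (term.toList.map (fun c =>
    match pvUpperTable.lookup c.toNat with
    | some n => Char.ofNat n
    | none => c))

-- ===== PRECONDITION & SPEC =====
def Spec_make_upper_case (term : String) (out : String) : Prop := out = make_upper_case_alt term
instance (term : String) (out : String) : Decidable (Spec_make_upper_case term out) := by unfold Spec_make_upper_case; infer_instance

-- ===== CLAIM (what is proved, stated in full; the proofs are below) =====
def Claim_equal_make_upper_case : Prop := ∀ (term : String), Dom_make_upper_case term → Spec_make_upper_case term (make_upper_case term)

-- ===== LEMMAS AND PROOFS =====

-- the per-character transformation both programs realize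
def pvF (c : Char) : Char :=
  if 96 < c.toNat ∧ c.toNat < 123 then Char.ofNat (c.toNat - 32) else c

-- A's loop body as a named function (definitionally the lambda in make_upper_case)
def pvStep (st : Int × List Char) (ch : Char) : Int × List Char :=
  if 96 < ch.toNat ∧ ch.toNat < 123 then
    (st.1 + 1, PySem.List.slice st.2 none (some st.1) ++ [Char.ofNat (ch.toNat - 32)]
                 ++ PySem.List.slice st.2 (some (st.1 + 1)) none)
  else (st.1 + 1, st.2)

-- B's table lookup computes pvF on every domain character
set_option maxHeartbeats 1000000 in
lemma lookup_eq_pvF (c : Char) (hd : pvDomChar c = true) :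
    pvF c = (match pvUpperTable.lookup c.toNat with
             | some n => Char.ofNat n
             | none => c) := by
  have ht : pvUpperTable = [(97,65),(98,66),(99,67),(100,68),(101,69),(102,70),(103,71),
      (104,72),(105,73),(106,74),(107,75),(108,76),(109,77),(110,78),(111,79),(112,80),
      (113,81),(114,82),(115,83),(116,84),(117,85),(118,86),(119,87),(120,88),(121,89),
      (122,90)] := by decide
  have hb : c.toNat ≤ 126 := by simp [pvDomChar] at hd; omega
  rw [ht]
  simp only [List.lookup]
  interval_cases h : c.toNat <;> simp_all [pvF]

-- A's loop invariant: the processed prefix is already mapped, i tracks its length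
lemma A_loop (l : List Char) (pre : List Char) :
    (List.foldl pvStep ((pre.length : Int), pre ++ l) l).2 = pre ++ l.map pvF := by
  induction l generalizing pre with
  | nil => simp
  | cons c l ih =>
    rw [List.foldl_cons]
    by_cases h : 96 < c.toNat ∧ c.toNat < 123
    · have hstep : pvStep ((pre.length : Int), pre ++ c :: l) c
          = (((pre ++ [Char.ofNat (c.toNat - 32)]).length : Int),
             (pre ++ [Char.ofNat (c.toNat - 32)]) ++ l) := by
        simp only [pvStep, if_pos h]
        refine Prod.ext ?_ ?_
        · simp
        · show PySem.List.slice (pre ++ c :: l) none (some (pre.length : Int)) ++ _ ++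
              PySem.List.slice (pre ++ c :: l) (some ((pre.length : Int) + 1)) none = _
          rw [PySem.List.slice_to_natCast]
          have h1 : (pre.length : Int) + 1 = ((pre.length + 1 : Nat) : Int) := by push_cast; ring
          rw [h1, PySem.List.slice_from_natCast]
          simp
      rw [hstep, ih]
      simp [pvF, h]
    · have hstep : pvStep ((pre.length : Int), pre ++ c :: l) c
          = (((pre ++ [c]).length : Int), (pre ++ [c]) ++ l) := by
        simp [pvStep, h]
      rw [hstep, ih]
      simp [pvF, h]

-- ===== VERDICT (by name: the statement is the Claim_ definition above) =====
theorem make_upper_case_spec : Claim_equal_make_upper_case := by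
  intro term hd
  unfold Spec_make_upper_case make_upper_case make_upper_case_alt
  have hall : ∀ c ∈ term.toList, pvDomChar c = true := by
    simpa [Dom_make_upper_case, pvDomStr, List.all_eq_true] using hd
  have h := A_loop term.toList []
  simp only [List.length_nil, Int.natCast_zero, List.nil_append] at h
  show String.mk (List.foldl pvStep ((0:Int), term.toList) term.toList).2 = _
  rw [h]
  congr 1
  exact List.map_congr_left (fun c hc => lookup_eq_pvF c (hall c hc))
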